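-- pv_equiv track=rewrite | github.com/kfurufuru/secretary-portal | fix-jsx-latex.py | fix_batch3_line
-- ===== SOURCE A (Python) =====
-- BS = chr(92)   # backslash
--
-- BT = chr(96)   # backtick
--
-- def wrap_latex(formula):
--     """Wrap a LaTeX formula in String.raw template literal for JSX."""
--     return '{String.raw' + BT + formula + BT + '}'
--
-- def fix_batch3_line(line):
--     """Find $...\...$ formulas in JSX text and wrap in String.raw."""
--     if BS not in line:
--         return line
--     # Skip pure comment or attribute lines
--     stripped = line.strip()
--     if stripped.startswith('//') or stripped.startswith('/*') or stripped.startswith('*'):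
--         return line
--
--     # Find $...$ formulas containing backslash, replace them
--     # Pattern: $ followed by non-$ chars (with optional backslash), then $
--     result = ''
--     i = 0
--     while i < len(line):
--         if line[i] == '$':
--             # Find matching close $
--             j = i + 1
--             while j < len(line) and line[j] != '$' and line[j] != '\n':
--                 j += 1
--             if j < len(line) and line[j] == '$':
--                 formula = line[i:j+1]
--                 if BS in formula:
--                     result += wrap_latex(formula)
--                 else:
--                     result += formula
--                 i = j + 1
--             else:
--                 result += line[i]
--                 i += 1
--         else:
--             result += line[i]
--             i += 1
--     return result
-- ===== SOURCE B (Python) =====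
-- BS = chr(92)   # backslash
--
-- BT = chr(96)   # backtick
--
-- def wrap_latex(formula):
--     """Wrap a LaTeX formula in String.raw template literal for JSX."""
--     return '{String.raw' + BT + formula + BT + '}'
--
-- def fix_batch3_line(line):
--     """Find $...\...$ formulas in JSX text and wrap in String.raw."""
--     if BS not in line:
--         return line
--     stripped = line.strip()
--     if stripped.startswith('//') or stripped.startswith('/*') or stripped.startswith('*'):
--         return line
--     # Split on the dollar delimiter and pair parts left to right: a part with no newline
--     # followed by another delimiter is a formula; otherwise the '$' is literal.
--     parts = line.split('$')
--     out = [parts[0]]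
--     k = 1
--     while k < len(parts):
--         if k + 1 < len(parts) and '\n' not in parts[k]:
--             formula = '$' + parts[k] + '$'
--             out.append(wrap_latex(formula) if BS in formula else formula)
--             out.append(parts[k + 1])
--             k += 2
--         else:
--             out.append('$' + parts[k])
--             k += 1
--     return ''.join(out)
-- ===== Notes on version B (the rewrite author's own statement) =====
-- stated objective: alternative
-- what changed: Replaces the character-by-character index scan (outer while with an inner delimiter-hunting while, building the result char by char) by a single str.split on the dollar delimiter followed by left-to-right pairing of the parts, joined once at the end.
import Mathlib
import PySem

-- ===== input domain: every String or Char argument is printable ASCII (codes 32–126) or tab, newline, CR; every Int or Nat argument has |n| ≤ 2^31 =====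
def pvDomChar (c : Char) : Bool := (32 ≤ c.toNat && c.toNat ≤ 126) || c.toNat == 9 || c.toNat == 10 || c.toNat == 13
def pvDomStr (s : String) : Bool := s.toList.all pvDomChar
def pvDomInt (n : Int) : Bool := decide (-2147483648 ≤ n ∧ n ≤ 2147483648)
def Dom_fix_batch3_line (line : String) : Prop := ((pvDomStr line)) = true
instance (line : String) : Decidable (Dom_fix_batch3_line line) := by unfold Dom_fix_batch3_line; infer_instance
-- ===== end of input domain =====

-- B replaces A's char-by-char index scan with a str.split on the dollar delimiter and left-to-right pairing of the parts; objective: alternative (same cost).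

-- shared module helper wrap_latex (both A and B call it)
def pvWrapLatex (formula : List Char) : List Char :=
  "{String.raw".toList ++ ['`'] ++ formula ++ ['`'] ++ ['}']

-- ===== PORT A =====
-- inner while of A: advance j while line[j] is neither '$' nor '\n'; returns (chars passed over, remainder)
def pvScanA : List Char → List Char × List Char
  | [] => ([], [])
  | c :: rest =>
    if c = '$' ∨ c = '\n' then ([], c :: rest)
    else
      let p := pvScanA rest
      (c :: p.1, p.2)

-- needed by pvLoopA's termination argument
theorem pvScanA_snd_len (l : List Char) : (pvScanA l).2.length ≤ l.length := by
  induction l with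
  | nil => simp [pvScanA]
  | cons c rest ih =>
    simp only [pvScanA]
    split
    · simp
    · simpa using Nat.le_succ_of_le ih

-- outer while loop of A, recursing on the remaining suffix of the line
def pvLoopA : List Char → List Char
  | [] => []
  | c :: rest =>
    if c = '$' then
      if (pvScanA rest).2.head? = some '$' then
        let formula := '$' :: ((pvScanA rest).1 ++ ['$'])
        (if '\\' ∈ formula then pvWrapLatex formula else formula) ++ pvLoopA (pvScanA rest).2.tail
      else c :: pvLoopA rest
    else c :: pvLoopA rest
termination_by l => l.length
decreasing_by
  · have h1 := pvScanA_snd_len rest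
    simp; omega
  · simp
  · simp

def fix_batch3_line (line : String) : String :=
  if PySem.Str.isIn "\\" line = false then line
  else
    let stripped := PySem.Str.strip line
    if PySem.Str.startswith stripped "//" || PySem.Str.startswith stripped "/*"
        || PySem.Str.startswith stripped "*" then line
    else String.ofList (pvLoopA line.toList)

-- ===== PORT B =====
-- B's while over parts: a part that is followed by another delimiter and free of '\n' is a formula
def pvLoopB : List (List Char) → List Char
  | [] => []
  | [p] => '$' :: p
  | p :: q :: rest =>
    if '\n' ∈ p then ('$' :: p) ++ pvLoopB (q :: rest)
    else
      let formula := '$' :: (p ++ ['$'])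
      (if '\\' ∈ formula then pvWrapLatex formula else formula) ++ q ++ pvLoopB rest

def fix_batch3_line_alt (line : String) : String :=
  if PySem.Str.isIn "\\" line = false then line
  else
    let stripped := PySem.Str.strip line
    if PySem.Str.startswith stripped "//" || PySem.Str.startswith stripped "/*"
        || PySem.Str.startswith stripped "*" then line
    else
      let parts := PySem.Chars.splitOn line.toList ['$']
      String.ofList (parts.headD [] ++ pvLoopB parts.tail)

-- ===== PRECONDITION & SPEC =====
def Spec_fix_batch3_line (line : String) (out : String) : Prop := out = fix_batch3_line_alt line
instance (line : String) (out : String) : Decidable (Spec_fix_batch3_line line out) := by unfold Spec_fix_batch3_line; infer_instance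

-- ===== CLAIM (what is proved, stated in full; the proofs are below) =====
def Claim_equal_fix_batch3_line : Prop := ∀ (line : String), Dom_fix_batch3_line line → Spec_fix_batch3_line line (fix_batch3_line line)

-- ===== LEMMAS AND PROOFS =====

-- the simple structural recursion computed by Python's line.split('$')
def pvSplit : List Char → List (List Char)
  | [] => [[]]
  | c :: rest => if c = '$' then [] :: pvSplit rest else (pvSplit rest).modifyHead (c :: ·)

theorem pvSplit_ne_nil (l : List Char) : pvSplit l ≠ [] := by
  induction l with
  | nil => simp [pvSplit]
  | cons c rest ih =>
    simp only [pvSplit]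
    split
    · simp
    · cases h : pvSplit rest with
      | nil => exact absurd h ih
      | cons q r => simp [List.modifyHead]

theorem pvSplitOn_go_char (fuel : Nat) : ∀ (l cur : List Char) (acc : List (List Char)), l.length < fuel →
    PySem.Chars.splitOn.go ['$'] fuel l cur acc
      = acc.reverse ++ (pvSplit l).modifyHead (cur.reverse ++ ·) := by
  induction fuel with
  | zero => intro l cur acc h; omega
  | succ fuel ih =>
    intro l cur acc h
    cases l with
    | nil => simp [PySem.Chars.splitOn.go, pvSplit]
    | cons c rest =>
      by_cases hc : c = '$'
      · subst hc
        rw [PySem.Chars.splitOn.go]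
        simp only [List.isPrefixOf, List.length_cons] at *
        rw [if_pos (by simp)]
        simp only [List.length_nil, List.drop_succ_cons, List.drop_zero]
        rw [ih rest [] _ (by simpa using Nat.lt_of_succ_lt_succ h)]
        simp only [pvSplit, List.reverse_cons, List.append_assoc]
        cases pvSplit rest <;> simp [List.modifyHead]
      · rw [PySem.Chars.splitOn.go]
        rw [if_neg (by simp [List.isPrefixOf, hc, BEq.symm_false])]
        rw [ih rest (c :: cur) acc (by simpa using Nat.lt_of_succ_lt_succ h)]
        simp only [pvSplit, if_neg hc]
        cases hs : pvSplit rest with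
        | nil => exact absurd hs (pvSplit_ne_nil rest)
        | cons q r => simp [List.modifyHead]

theorem pvSplitOn_eq_pvSplit (l : List Char) : PySem.Chars.splitOn l ['$'] = pvSplit l := by
  rw [PySem.Chars.splitOn, pvSplitOn_go_char (l.length + 1) l [] [] (by omega)]
  cases h : pvSplit l with
  | nil => exact absurd h (pvSplit_ne_nil l)
  | cons q r => simp [List.modifyHead]

-- loopA copies a '$'-free prefix verbatim
theorem pvLoopA_append (p cs : List Char) (hp : '$' ∉ p) :
    pvLoopA (p ++ cs) = p ++ pvLoopA cs := by
  induction p with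
  | nil => simp
  | cons c p ih =>
    have hc : c ≠ '$' := fun h => hp (h ▸ List.mem_cons_self)
    rw [List.cons_append, pvLoopA, if_neg hc, ih (fun h => hp (List.mem_cons_of_mem _ h))]
    simp

theorem pvLoopA_id (p : List Char) (hp : '$' ∉ p) : pvLoopA p = p := by
  have := pvLoopA_append p [] hp
  simpa [pvLoopA] using this

theorem pvScanA_append (f r : List Char) (h1 : '$' ∉ f) (h2 : '\n' ∉ f) :
    pvScanA (f ++ r) = (f ++ (pvScanA r).1, (pvScanA r).2) := by
  induction f with
  | nil => simp
  | cons c f ih =>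
    have hc : ¬(c = '$' ∨ c = '\n') := by
      rintro (h | h) <;> subst h
      · exact h1 List.mem_cons_self
      · exact h2 List.mem_cons_self
    rw [List.cons_append]
    simp only [pvScanA, if_neg hc,
      ih (fun h => h1 (List.mem_cons_of_mem _ h)) (fun h => h2 (List.mem_cons_of_mem _ h))]
    simp

theorem pvSplit_clean (f : List Char) (hf : '$' ∉ f) : pvSplit f = [f] := by
  induction f with
  | nil => rfl
  | cons c f ih =>
    have hc : c ≠ '$' := fun h => hf (h ▸ List.mem_cons_self)
    rw [pvSplit, if_neg hc, ih (fun h => hf (List.mem_cons_of_mem _ h))]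
    rfl

theorem pvSplit_append (f cs : List Char) (hf : '$' ∉ f) :
    pvSplit (f ++ '$' :: cs) = f :: pvSplit cs := by
  induction f with
  | nil => simp [pvSplit]
  | cons c f ih =>
    have hc : c ≠ '$' := fun h => hf (h ▸ List.mem_cons_self)
    rw [List.cons_append, pvSplit, if_neg hc, ih (fun h => hf (List.mem_cons_of_mem _ h))]
    rfl

theorem pvExistsFirst (a : Char) (cs : List Char) (h : a ∈ cs) :
    ∃ f r, a ∉ f ∧ cs = f ++ a :: r := by
  induction cs with
  | nil => cases h
  | cons c cs ih =>
    by_cases hc : c = a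
    · exact ⟨[], cs, by simp, by simp [hc]⟩
    · rcases ih (by cases h with | head => exact absurd rfl hc | tail _ h => exact h) with ⟨f, r, hf, he⟩
      exact ⟨c :: f, r, by simp [hf, Ne.symm hc], by simp [he]⟩

-- what B computes from the parts list (first part verbatim, then the pairing loop)
def pvGlue : List (List Char) → List Char
  | [] => []
  | q :: r => q ++ pvLoopB r

-- main induction: both forms at once, strong induction on length
theorem pvMain (n : Nat) : ∀ cs : List Char, cs.length ≤ n →
    (pvLoopA cs = pvGlue (pvSplit cs)) ∧ (pvLoopA ('$' :: cs) = pvLoopB (pvSplit cs)) := by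
  induction n with
  | zero =>
    intro cs hcs
    have : cs = [] := List.eq_nil_of_length_eq_zero (Nat.le_zero.mp hcs)
    subst this
    constructor
    · simp [pvLoopA, pvSplit, pvGlue, pvLoopB]
    · rw [pvLoopA]
      simp [pvScanA, pvSplit, pvLoopB, pvLoopA]
  | succ n ih =>
    intro cs hcs
    constructor
    · -- the whole line: copy the '$'-free prefix, then the loop from the first '$'
      by_cases hd : '$' ∈ cs
      · rcases pvExistsFirst '$' cs hd with ⟨f, cs', hf, he⟩
        subst he
        rw [pvLoopA_append f ('$' :: cs') hf, pvSplit_append f cs' hf]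
        have hlen : cs'.length ≤ n := by
          have := hcs; simp [List.length_append] at this; omega
        rw [(ih cs' hlen).2]
        rfl
      · rw [pvLoopA_id cs hd, pvSplit_clean cs hd]
        simp [pvGlue, pvLoopB]
    · -- positioned at a '$': the four cases of close-found × newline-in-between
      by_cases hd : '$' ∈ cs
      · rcases pvExistsFirst '$' cs hd with ⟨g, cs'', hg, he⟩
        subst he
        rw [pvSplit_append g cs'' hg]
        by_cases hn : '\n' ∈ g
        · -- unmatched: A's scan stops at the newline inside g, the '$' stays literal
          rcases pvExistsFirst '\n' g hn with ⟨g1, g2, hg1, hge⟩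
          have hg1d : '$' ∉ g1 := fun h => hg (hge ▸ List.mem_append_left _ h)
          rw [pvLoopA, if_pos rfl]
          rw [show g ++ '$' :: cs'' = g1 ++ '\n' :: (g2 ++ '$' :: cs'') from by simp [hge]]
          rw [pvScanA_append g1 _ hg1d hg1]
          have hsc : pvScanA ('\n' :: (g2 ++ '$' :: cs'')) = ([], '\n' :: (g2 ++ '$' :: cs'')) := by
            simp [pvScanA]
          rw [hsc]
          simp only [List.head?_cons, Option.some.injEq, if_neg (by decide : ¬('\n' = '$'))]
          rw [show g1 ++ '\n' :: (g2 ++ '$' :: cs'') = g ++ '$' :: cs'' from by simp [hge]]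
          rw [pvLoopA_append g _ hg]
          have hlen : cs''.length ≤ n := by
            have := hcs; simp [List.length_append] at this; omega
          rw [(ih cs'' hlen).2]
          cases hq : pvSplit cs'' with
          | nil => exact absurd hq (pvSplit_ne_nil cs'')
          | cons q r =>
            rw [pvLoopB, if_pos hn]
            simp
        · -- matched formula $g$
          rw [pvLoopA, if_pos rfl, pvScanA_append g ('$' :: cs'') hg hn]
          have hsc : pvScanA ('$' :: cs'') = ([], '$' :: cs'') := by simp [pvScanA]
          rw [hsc]
          simp only [List.head?_cons, List.tail_cons, List.append_nil]
          have hlen : cs''.length ≤ n := by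
            have := hcs; simp [List.length_append] at this; omega
          rw [(ih cs'' hlen).1]
          cases hq : pvSplit cs'' with
          | nil => exact absurd hq (pvSplit_ne_nil cs'')
          | cons q r =>
            rw [pvLoopB, if_neg hn]
            simp [pvGlue]
      · -- no closing '$' at all
        rw [pvSplit_clean cs hd, pvLoopA, if_pos rfl]
        by_cases hn : '\n' ∈ cs
        · rcases pvExistsFirst '\n' cs hn with ⟨g1, g2, hg1, hge⟩
          have hg1d : '$' ∉ g1 := fun h => hd (hge ▸ List.mem_append_left _ h)
          rw [hge, pvScanA_append g1 _ hg1d hg1]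
          have hsc : pvScanA ('\n' :: g2) = ([], '\n' :: g2) := by simp [pvScanA]
          rw [hsc]
          simp only [List.head?_cons, Option.some.injEq, if_neg (by decide : ¬('\n' = '$'))]
          rw [← hge, pvLoopA_id cs hd, pvLoopB]
        · have hsc : pvScanA cs = (cs ++ ([] : List Char), ([] : List Char)) := by
            have := pvScanA_append cs [] hd hn
            simpa [pvScanA] using this
          rw [hsc]
          simp only [List.head?_nil, reduceCtorEq, if_false]
          rw [pvLoopA_id cs hd, pvLoopB]

-- ===== VERDICT (by name: the statement is the Claim_ definition above) =====
theorem fix_batch3_line_spec : Claim_equal_fix_batch3_line := by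
  intro line _
  show fix_batch3_line line = fix_batch3_line_alt line
  by_cases h1 : PySem.Str.isIn "\\" line = false
  · simp only [fix_batch3_line, fix_batch3_line_alt, if_pos h1]
  by_cases h2 : (PySem.Str.startswith (PySem.Str.strip line) "//"
      || PySem.Str.startswith (PySem.Str.strip line) "/*"
      || PySem.Str.startswith (PySem.Str.strip line) "*") = true
  · simp only [fix_batch3_line, fix_batch3_line_alt, if_neg h1, if_pos h2]
  · simp only [fix_batch3_line, fix_batch3_line_alt, if_neg h1, if_neg h2]
    rw [pvSplitOn_eq_pvSplit]
    have hm := (pvMain line.toList.length line.toList le_rfl).1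
    cases hq : pvSplit line.toList with
    | nil => exact absurd hq (pvSplit_ne_nil line.toList)
    | cons q r =>
      rw [hq] at hm
      simp only [List.headD, List.tail_cons]
      rw [hm]
      rfl
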